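-- pv_equiv track=rewrite | github.com/Rahulnisanth/Complete-Python-Hub | Level-up/Complexity-8/chemist-work.py | find_min_bowls
-- ===== SOURCE A (Python) =====
-- def find_min_bowls(compound_defs, compounds_to_prepare):
--     dependencies = {}
--     for definition in compound_defs:
--         compound, elements = definition.split('=')
--         elements = elements.split('+')
--         dependencies[compound] = elements
--
--     def max_depth(compound, memo):
--         if compound not in dependencies: return 0
--
--         if compound in memo:
--             return memo[compound]
--
--         max_depth_value = 0
--         for elem in dependencies[compound]:
--             max_depth_value = max(max_depth_value, max_depth(elem, memo))
--
--         memo[compound] = max_depth_value + 1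
--         return memo[compound]
--
--     max_bowls = 0
--     memo = {}
--     for compound in compounds_to_prepare:
--         max_bowls = max(max_bowls, max_depth(compound, memo))
--     return max_bowls
-- ===== SOURCE B (Python) =====
-- def find_min_bowls(compound_defs, compounds_to_prepare):
--     deps = {}
--     for definition in compound_defs:
--         compound, elements = definition.split('=')
--         deps[compound] = elements.split('+')
--     depth = {}
--     for k in deps:
--         depth[k] = 1
--     for _ in range(len(deps)):
--         for k in deps:
--             m = 0
--             for e in deps[k]:
--                 m = max(m, depth.get(e, 0))
--             depth[k] = m + 1
--     best = 0
--     for c in compounds_to_prepare: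
--         best = max(best, depth.get(c, 0))
--     return best
-- ===== Notes on version B (the rewrite author's own statement) =====
-- stated objective: alternative
-- what changed: B replaces A's memoized recursive DFS over the dependency graph by an iterative Bellman-Ford-style computation: all key depths start at 1 and are relaxed in len(deps) in-place rounds, then the maximum over the targets is read off; B also terminates on cyclic inputs (where A recurses forever).
import Mathlib
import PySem

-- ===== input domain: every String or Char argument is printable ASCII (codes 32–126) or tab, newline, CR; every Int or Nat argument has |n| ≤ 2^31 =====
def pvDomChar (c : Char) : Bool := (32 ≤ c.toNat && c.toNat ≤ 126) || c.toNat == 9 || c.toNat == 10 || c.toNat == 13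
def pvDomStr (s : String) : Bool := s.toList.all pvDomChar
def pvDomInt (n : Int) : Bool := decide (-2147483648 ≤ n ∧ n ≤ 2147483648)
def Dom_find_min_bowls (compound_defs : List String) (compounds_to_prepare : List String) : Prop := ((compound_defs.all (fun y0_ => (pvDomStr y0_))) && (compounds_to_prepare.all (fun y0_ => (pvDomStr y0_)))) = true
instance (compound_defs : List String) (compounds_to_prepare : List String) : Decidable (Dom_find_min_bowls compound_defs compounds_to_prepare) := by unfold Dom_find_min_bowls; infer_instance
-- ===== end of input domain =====

-- B replaces A's memoized recursive DFS by Bellman-Ford-style relaxation rounds (alternative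
-- decomposition, similar cost); equal on Pre_ (well-formed definitions, no cycle reachable
-- from a target).

-- ===== PORT A =====
-- shared parse loop (identical in Source A and Source B): dependencies[compound] = elements.
-- 'compound, elements = definition.split("=")' is exact when the definition contains exactly
-- one '=' (guaranteed by Pre_); otherwise Python raises ValueError.
def pvParse (compound_defs : List String) : PySem.Dict String (List String) :=
  compound_defs.foldl (fun d definition =>
    let parts := (PySem.Str.split? definition "=").getD []
    d.insert (parts.getD 0 "") (((PySem.Str.split? (parts.getD 1 "") "+").getD []))) PySem.Dict.empty

-- A's recursive max_depth with threaded memo; fuel = number of keys bounds the recursion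
-- depth on an acyclic graph (Pre_), the fuel-0 branch is never reached under Pre_.
def pvMaxDepthA (deps : PySem.Dict String (List String)) :
    Nat → String → PySem.Dict String Int → Int × PySem.Dict String Int
  | fuel, compound, memo =>
    if deps.contains compound = false then (0, memo)
    else match memo.get? compound with
      | some v => (v, memo)
      | none =>
        match fuel with
        | 0 => (0, memo)
        | fuel' + 1 =>
          let st := (deps.getD compound []).foldl
            (fun (st : Int × PySem.Dict String Int) elem =>
              let r := pvMaxDepthA deps fuel' elem st.2
              (max st.1 r.1, r.2)) (0, memo)
          (st.1 + 1, st.2.insert compound (st.1 + 1))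

def find_min_bowls (compound_defs : List String) (compounds_to_prepare : List String) : Int :=
  let deps := pvParse compound_defs
  (compounds_to_prepare.foldl (fun (st : Int × PySem.Dict String Int) compound =>
      let r := pvMaxDepthA deps deps.size compound st.2
      (max st.1 r.1, r.2)) (0, PySem.Dict.empty)).1

-- ===== PORT B =====
-- one in-place relaxation: depth[k] = max(depth.get(e, 0) for e in deps[k]) + 1
def pvRelax (deps : PySem.Dict String (List String)) (depth : PySem.Dict String Int)
    (k : String) : PySem.Dict String Int :=
  depth.insert k ((deps.getD k []).foldl (fun m e => max m (depth.getD e 0)) 0 + 1)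

def pvRound (deps : PySem.Dict String (List String)) (depth : PySem.Dict String Int) :
    PySem.Dict String Int :=
  deps.keys.foldl (pvRelax deps) depth

def find_min_bowls_alt (compound_defs : List String) (compounds_to_prepare : List String) : Int :=
  let deps := pvParse compound_defs
  let depth0 := deps.keys.foldl (fun d k => d.insert k (1 : Int)) PySem.Dict.empty
  let depth := (List.range deps.size).foldl (fun d _ => pvRound deps d) depth0
  compounds_to_prepare.foldl (fun best c => max best (depth.getD c 0)) 0

-- ===== PRECONDITION & SPEC =====
-- bounded reachability in the dependency graph: a path of at most f edges from a to b
def pvReachF (deps : PySem.Dict String (List String)) : Nat → String → String → Bool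
  | 0, _, _ => false
  | f + 1, a, b => (deps.getD a []).any (fun x => x == b || pvReachF deps f x b)

-- Pre_ excludes exactly the inputs where A does not return: (i) a definition without exactly
-- one '=' (A raises ValueError), and (ii) a target compound from which a dependency cycle is
-- reachable (A's unguarded recursion never terminates there).
def Pre_find_min_bowls (compound_defs : List String) (compounds_to_prepare : List String) : Prop :=
  (∀ d ∈ compound_defs, PySem.Str.count d "=" = 1) ∧
  (∀ t ∈ compounds_to_prepare,
     pvReachF (pvParse compound_defs) (pvParse compound_defs).size t t = false ∧
     ∀ k ∈ (pvParse compound_defs).keys,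
       pvReachF (pvParse compound_defs) ((pvParse compound_defs).size + 1) t k = true →
       pvReachF (pvParse compound_defs) (pvParse compound_defs).size k k = false)

instance (compound_defs : List String) (compounds_to_prepare : List String) :
    Decidable (Pre_find_min_bowls compound_defs compounds_to_prepare) := by
  unfold Pre_find_min_bowls; infer_instance

def pvWitness_find_min_bowls : List String × List String := (["a=b+c", "b=c"], ["a", "d"])

def Spec_find_min_bowls (compound_defs : List String) (compounds_to_prepare : List String) (out : Int) : Prop := out = find_min_bowls_alt compound_defs compounds_to_prepare
instance (compound_defs : List String) (compounds_to_prepare : List String) (out : Int) : Decidable (Spec_find_min_bowls compound_defs compounds_to_prepare out) := by unfold Spec_find_min_bowls; infer_instance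

-- ===== CLAIM (what is proved, stated in full; the proofs are below) =====
def Claim_equal_find_min_bowls : Prop := ∀ (compound_defs : List String) (compounds_to_prepare : List String), Dom_find_min_bowls compound_defs compounds_to_prepare → Pre_find_min_bowls compound_defs compounds_to_prepare → Spec_find_min_bowls compound_defs compounds_to_prepare (find_min_bowls compound_defs compounds_to_prepare)

-- ===== LEMMAS AND PROOFS =====

-- reference depth function: pvD f c = depth of c computed with f units of fuel
def pvD (deps : PySem.Dict String (List String)) : Nat → String → Int
  | 0, _ => 0
  | f + 1, c =>
    match deps.get? c with
    | none => 0
    | some es => es.foldl (fun m e => max m (pvD deps f e)) 0 + 1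

def pvT (deps : PySem.Dict String (List String)) (c : String) : Int := pvD deps deps.size c

-- an edge of the dependency graph
def pvStepTo (deps : PySem.Dict String (List String)) (a b : String) : Prop :=
  b ∈ deps.getD a []

-- a path a → … → b with intermediate vertices l
def pvIsPath (deps : PySem.Dict String (List String)) : String → List String → String → Prop
  | a, [], b => pvStepTo deps a b
  | a, x :: l, b => pvStepTo deps a x ∧ pvIsPath deps x l b

-- folds of max
theorem pv_foldl_max_le_init {α : Type} (es : List α) (g : α → Int) (m : Int) :
    m ≤ es.foldl (fun acc e => max acc (g e)) m := by
  induction es generalizing m with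
  | nil => simp
  | cons a l ih => exact le_trans (le_max_left m (g a)) (ih (max m (g a)))

theorem pv_foldl_max_mono {α : Type} (es : List α) (g h : α → Int) (m m' : Int)
    (hm : m ≤ m') (hgh : ∀ e ∈ es, g e ≤ h e) :
    es.foldl (fun acc e => max acc (g e)) m ≤ es.foldl (fun acc e => max acc (h e)) m' := by
  induction es generalizing m m' with
  | nil => simpa using hm
  | cons a l ih =>
    exact ih _ _ (max_le_max hm (hgh a (by simp))) (fun e he => hgh e (by simp [he]))

theorem pv_foldl_max_congr {α : Type} (es : List α) (g h : α → Int) (m : Int)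
    (hgh : ∀ e ∈ es, g e = h e) :
    es.foldl (fun acc e => max acc (g e)) m = es.foldl (fun acc e => max acc (h e)) m := by
  induction es generalizing m with
  | nil => rfl
  | cons a l ih =>
    simp only [List.foldl_cons, hgh a (by simp)]
    exact ih _ (fun e he => hgh e (by simp [he]))

theorem pv_foldl_max_le_bound {α : Type} (es : List α) (g : α → Int) (m B : Int)
    (hm : m ≤ B) (hg : ∀ e ∈ es, g e ≤ B) :
    es.foldl (fun acc e => max acc (g e)) m ≤ B := by
  induction es generalizing m with
  | nil => simpa using hm
  | cons a l ih =>
    exact ih (max m (g a)) (max_le hm (hg a (by simp))) (fun e he => hg e (by simp [he]))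

theorem pv_foldl_max_mem {α : Type} (es : List α) (g : α → Int) (m : Int) {e : α}
    (he : e ∈ es) : g e ≤ es.foldl (fun acc e => max acc (g e)) m := by
  induction he generalizing m with
  | head l => exact le_trans (le_max_right m (g e)) (pv_foldl_max_le_init l g _)
  | tail b hmem ih => exact ih _

theorem pvD_nonneg (deps : PySem.Dict String (List String)) (f : Nat) (c : String) :
    0 ≤ pvD deps f c := by
  cases f with
  | zero => simp [pvD]
  | succ f =>
    cases hgc : deps.get? c with
    | none => simp [pvD, hgc]
    | some es =>
      simp only [pvD, hgc]
      have := pv_foldl_max_le_init es (pvD deps f) 0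
      omega

theorem pvD_le_fuel (deps : PySem.Dict String (List String)) (f : Nat) (c : String) :
    pvD deps f c ≤ (f : Int) := by
  induction f generalizing c with
  | zero => simp [pvD]
  | succ f ih =>
    cases hgc : deps.get? c with
    | none => simp [pvD, hgc]; positivity
    | some es =>
      simp only [pvD, hgc]
      have := pv_foldl_max_le_bound es (pvD deps f) 0 (f : Int) (by positivity)
        (fun e _ => ih e)
      push_cast
      omega

theorem pvD_nonkey (deps : PySem.Dict String (List String)) (f : Nat) (c : String)
    (h : deps.get? c = none) : pvD deps f c = 0 := by
  cases f with
  | zero => rfl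
  | succ f => simp [pvD, h]

-- paths
theorem pv_step_src_key (deps : PySem.Dict String (List String)) {a b : String}
    (h : pvStepTo deps a b) : a ∈ deps.keys := by
  by_contra hmem
  have hc : ¬ deps.contains a = true := fun hc =>
    hmem ((PySem.Dict.contains_iff_mem_keys deps a).mp hc)
  have : deps.getD a [] = [] :=
    PySem.Dict.getD_of_not_contains deps [] (Bool.not_eq_true _ ▸ hc)
  simp [pvStepTo, this] at h

theorem pv_path_start_key (deps : PySem.Dict String (List String)) (a : String)
    (l : List String) (b : String) (h : pvIsPath deps a l b) : a ∈ deps.keys := by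
  cases l with
  | nil => exact pv_step_src_key deps h
  | cons x l => exact pv_step_src_key deps h.1

theorem pv_path_mem_keys (deps : PySem.Dict String (List String)) (a : String)
    (l : List String) (b : String) (h : pvIsPath deps a l b) : ∀ x ∈ l, x ∈ deps.keys := by
  induction l generalizing a with
  | nil => intro x hx; cases hx
  | cons y l ih =>
    intro x hx
    rcases List.mem_cons.mp hx with rfl | hx
    · exact pv_path_start_key deps x l b h.2
    · exact ih y h.2 x hx

theorem pv_path_snoc (deps : PySem.Dict String (List String)) (a : String) (l : List String)
    (c e : String) (h : pvIsPath deps a l c) (he : pvStepTo deps c e) :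
    pvIsPath deps a (l ++ [c]) e := by
  induction l generalizing a with
  | nil => exact ⟨h, he⟩
  | cons x l ih => exact ⟨h.1, ih x h.2⟩

theorem pv_path_append (deps : PySem.Dict String (List String)) (a : String)
    (l₁ : List String) (x : String) (l₂ : List String) (b : String) :
    pvIsPath deps a (l₁ ++ x :: l₂) b ↔ pvIsPath deps a l₁ x ∧ pvIsPath deps x l₂ b := by
  induction l₁ generalizing a with
  | nil => exact Iff.rfl
  | cons y l ih =>
    constructor
    · rintro ⟨h1, h2⟩
      obtain ⟨ha, hb⟩ := (ih y).mp h2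
      exact ⟨⟨h1, ha⟩, hb⟩
    · rintro ⟨⟨h1, h2⟩, h3⟩
      exact ⟨h1, (ih y).mpr ⟨h2, h3⟩⟩

theorem pv_dup_decomp {α : Type} (l : List α) (h : ¬ l.Nodup) :
    ∃ (x : α) (l₁ l₂ l₃ : List α), l = l₁ ++ x :: l₂ ++ x :: l₃ := by
  induction l with
  | nil => exact absurd List.nodup_nil h
  | cons y l ih =>
    by_cases hy : y ∈ l
    · obtain ⟨s, t, rfl⟩ := List.append_of_mem hy
      exact ⟨y, [], s, t, rfl⟩
    · have : ¬ l.Nodup := fun hnd => h (List.nodup_cons.mpr ⟨hy, hnd⟩)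
      obtain ⟨x, l₁, l₂, l₃, rfl⟩ := ih this
      exact ⟨x, y :: l₁, l₂, l₃, rfl⟩

theorem pv_path_shorten (deps : PySem.Dict String (List String)) (a : String)
    (l : List String) (h : pvIsPath deps a l a) :
    ∃ l', pvIsPath deps a l' a ∧ l'.Nodup ∧ a ∉ l' ∧ l'.length ≤ l.length := by
  suffices H : ∀ (n : Nat) (l : List String), l.length ≤ n → pvIsPath deps a l a →
      ∃ l', pvIsPath deps a l' a ∧ l'.Nodup ∧ a ∉ l' ∧ l'.length ≤ l.length by
    exact H l.length l le_rfl h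
  intro n
  induction n with
  | zero =>
    intro l hl h
    have : l = [] := List.length_eq_zero_iff.mp (Nat.le_zero.mp hl)
    subst this
    exact ⟨[], h, List.nodup_nil, by simp, le_rfl⟩
  | succ n ih =>
    intro l hl h
    by_cases ha : a ∈ l
    · obtain ⟨s, t, rfl⟩ := List.append_of_mem ha
      obtain ⟨h1, h2⟩ := (pv_path_append deps a s a t a).mp h
      obtain ⟨l', hp, hnd, hna, hle⟩ := ih t (by simp at hl; omega) h2
      exact ⟨l', hp, hnd, hna, by simp; omega⟩
    · by_cases hnd : l.Nodup
      · exact ⟨l, h, hnd, ha, le_rfl⟩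
      · obtain ⟨x, l₁, l₂, l₃, rfl⟩ := pv_dup_decomp l hnd
        have h' := h
        rw [show l₁ ++ x :: l₂ ++ x :: l₃ = l₁ ++ x :: (l₂ ++ x :: l₃) by simp] at h'
        obtain ⟨h1, h2⟩ := (pv_path_append deps a l₁ x (l₂ ++ x :: l₃) a).mp h'
        obtain ⟨_, h3⟩ := (pv_path_append deps x l₂ x l₃ a).mp h2
        have hcomb : pvIsPath deps a (l₁ ++ x :: l₃) a :=
          (pv_path_append deps a l₁ x l₃ a).mpr ⟨h1, h3⟩
        have hlen2 : (l₁ ++ x :: l₃).length ≤ n := by simp at hl ⊢; omega -- dedup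
        obtain ⟨l', hp, hnd', hna, hle⟩ := ih (l₁ ++ x :: l₃) hlen2 hcomb
        refine ⟨l', hp, hnd', hna, ?_⟩
        simp at hle ⊢
        omega

theorem pv_reachF_of_path (deps : PySem.Dict String (List String)) (f : Nat) (a : String)
    (l : List String) (b : String) (h : pvIsPath deps a l b) (hf : l.length < f) :
    pvReachF deps f a b = true := by
  induction l generalizing a f with
  | nil =>
    obtain ⟨f, rfl⟩ : ∃ f', f = f' + 1 := ⟨f - 1, by omega⟩
    simp only [pvReachF, List.any_eq_true]
    exact ⟨b, h, by simp⟩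
  | cons x l ih =>
    obtain ⟨f, rfl⟩ : ∃ f', f = f' + 1 := ⟨f - 1, by omega⟩
    simp only [pvReachF, List.any_eq_true]
    refine ⟨x, h.1, ?_⟩
    simp [ih f x h.2 (by simp at hf; omega)]

theorem pv_path_dedup (deps : PySem.Dict String (List String)) (a : String)
    (l : List String) (b : String) (h : pvIsPath deps a l b) :
    ∃ l', pvIsPath deps a l' b ∧ l'.Nodup := by
  suffices H : ∀ (n : Nat) (l : List String), l.length ≤ n → pvIsPath deps a l b →
      ∃ l', pvIsPath deps a l' b ∧ l'.Nodup by
    exact H l.length l le_rfl h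
  intro n
  induction n with
  | zero =>
    intro l hl h
    have : l = [] := List.length_eq_zero_iff.mp (Nat.le_zero.mp hl)
    subst this
    exact ⟨[], h, List.nodup_nil⟩
  | succ n ih =>
    intro l hl h
    by_cases hnd : l.Nodup
    · exact ⟨l, h, hnd⟩
    · obtain ⟨x, l₁, l₂, l₃, rfl⟩ := pv_dup_decomp l hnd
      have h' := h
      rw [show l₁ ++ x :: l₂ ++ x :: l₃ = l₁ ++ x :: (l₂ ++ x :: l₃) by simp] at h'
      obtain ⟨h1, h2⟩ := (pv_path_append deps a l₁ x (l₂ ++ x :: l₃) b).mp h'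
      obtain ⟨_, h3⟩ := (pv_path_append deps x l₂ x l₃ b).mp h2
      exact ih (l₁ ++ x :: l₃) (by simp at hl ⊢; omega)
        ((pv_path_append deps a l₁ x l₃ b).mpr ⟨h1, h3⟩)

-- a vertex is safe when no dependency cycle is reachable from it (A terminates exactly there)
def pvSafe (deps : PySem.Dict String (List String)) (c : String) : Prop :=
  ∀ k, (k = c ∨ ∃ l, pvIsPath deps c l k) → ∀ l', ¬ pvIsPath deps k l' k

theorem pv_safe_child (deps : PySem.Dict String (List String)) {c e : String}
    (h : pvSafe deps c) (he : pvStepTo deps c e) : pvSafe deps e := by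
  intro k hk l' hcyc
  refine h k ?_ l' hcyc
  rcases hk with rfl | ⟨l, hl⟩
  · exact Or.inr ⟨[], he⟩
  · exact Or.inr ⟨e :: l, he, hl⟩

theorem pv_safe_no_cycle (deps : PySem.Dict String (List String)) {c : String}
    (h : pvSafe deps c) : ∀ l, ¬ pvIsPath deps c l c :=
  fun l => h c (Or.inl rfl) l

-- a nodup list of keys together with a fresh key respects the size bound
theorem pv_nodup_size (deps : PySem.Dict String (List String)) (P : List String) (c : String) (hPnd : P.Nodup) (hPk : ∀ p ∈ P, p ∈ deps.keys)
    (hc : c ∈ deps.keys) (hcP : c ∉ P) : P.length + 1 ≤ deps.size := by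
  have hnodup : (c :: P).Nodup := List.nodup_cons.mpr ⟨hcP, hPnd⟩
  have hsub : (c :: P) ⊆ deps.keys := by
    intro x hx
    rcases List.mem_cons.mp hx with rfl | hx
    · exact hc
    · exact hPk x hx
  have hlen := (hnodup.subperm hsub).length_le
  have hkl : deps.keys.length = deps.size := by
    simp [PySem.Dict.keys, PySem.Dict.size]
  simp at hlen
  omega

-- Pre_'s bounded conditions at a target give full safety
theorem pv_safe_of_pre (deps : PySem.Dict String (List String)) (hnd : deps.keys.Nodup)
    (t : String) (h1 : pvReachF deps deps.size t t = false)
    (h2 : ∀ k ∈ deps.keys, pvReachF deps (deps.size + 1) t k = true →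
      pvReachF deps deps.size k k = false) : pvSafe deps t := by
  intro k hk l' hcyc
  have hkkeys : k ∈ deps.keys := pv_path_start_key deps k l' k hcyc
  obtain ⟨lc, hc, hcnd, hkn, _⟩ := pv_path_shorten deps k l' hcyc
  have hlenc : lc.length + 1 ≤ deps.size :=
    pv_nodup_size deps lc k hcnd (pv_path_mem_keys deps k lc k hc) hkkeys hkn
  have hcycK : pvReachF deps deps.size k k = true :=
    pv_reachF_of_path deps deps.size k lc k hc (by omega)
  rcases hk with rfl | ⟨l, hl⟩
  · rw [h1] at hcycK; cases hcycK
  · obtain ⟨l2, hl2, hnd2⟩ := pv_path_dedup deps t l k hl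
    have hsub : l2 ⊆ deps.keys := pv_path_mem_keys deps t l2 k hl2
    have hlen2 : l2.length ≤ deps.keys.length := (hnd2.subperm hsub).length_le
    have hkl : deps.keys.length = deps.size := by
      simp [PySem.Dict.keys, PySem.Dict.size]
    have hre : pvReachF deps (deps.size + 1) t k = true :=
      pv_reachF_of_path deps (deps.size + 1) t l2 k hl2 (by omega)
    rw [h2 k hkkeys hre] at hcycK
    cases hcycK

-- membership in keys gives a get? value
theorem pv_mem_keys_get? (deps : PySem.Dict String (List String)) {c : String}
    (hc : c ∈ deps.keys) : ∃ es, deps.get? c = some es := by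
  cases hgc : deps.get? c with
  | none => exact absurd ((PySem.Dict.get?_eq_none_iff_not_mem_keys deps c).mp hgc) (by simp [hc])
  | some es => exact ⟨es, rfl⟩

-- stability of pvD: with enough fuel the value no longer changes
theorem pvD_stable_aux (deps : PySem.Dict String (List String)) (hnd : deps.keys.Nodup) :
    ∀ (f : Nat) (P : List String) (c : String), pvSafe deps c → P.Nodup →
      (∀ p ∈ P, p ∈ deps.keys) →
      (∀ p ∈ P, ∃ l, pvIsPath deps p l c) → deps.size ≤ f + P.length →
      pvD deps f c = pvD deps (f + 1) c := by
  intro f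
  induction f using Nat.strong_induction_on with
  | _ f ih =>
    intro P c hsafe hPnd hPk hPp hsize
    cases hgc : deps.get? c with
    | none => rw [pvD_nonkey deps _ c hgc, pvD_nonkey deps _ c hgc]
    | some es =>
      have hck : c ∈ deps.keys := by
        by_contra hmem
        rw [(PySem.Dict.get?_eq_none_iff_not_mem_keys deps c).mpr hmem] at hgc
        cases hgc
      have hcP : c ∉ P := fun hmem => by
        obtain ⟨l, hl⟩ := hPp c hmem
        exact pv_safe_no_cycle deps hsafe l hl
      have hlen : P.length + 1 ≤ deps.size := pv_nodup_size deps P c hPnd hPk hck hcP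
      obtain ⟨f', rfl⟩ : ∃ f', f = f' + 1 := ⟨f - 1, by omega⟩
      have hstep : ∀ e ∈ es, pvStepTo deps c e := by
        intro e he
        unfold pvStepTo
        rw [PySem.Dict.getD_of_get?_eq_some deps [] hgc]
        exact he
      simp only [pvD, hgc]
      congr 1
      apply pv_foldl_max_congr
      intro e he
      refine ih f' (by omega) (P ++ [c]) e (pv_safe_child deps hsafe (hstep e he)) ?_ ?_ ?_
        (by simp; omega)
      · rw [List.nodup_append_comm]
        exact List.nodup_cons.mpr ⟨hcP, hPnd⟩
      · intro p hp
        rcases List.mem_append.mp hp with hp | hp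
        · exact hPk p hp
        · simp at hp; subst hp; exact hck
      · intro p hp
        rcases List.mem_append.mp hp with hp | hp
        · obtain ⟨l, hl⟩ := hPp p hp
          exact ⟨l ++ [c], pv_path_snoc deps p l c e hl (hstep e he)⟩
        · simp at hp; subst hp
          exact ⟨[], hstep e he⟩

theorem pvT_unfold (deps : PySem.Dict String (List String)) (hnd : deps.keys.Nodup)
    {c : String} (hsafe : pvSafe deps c) (es : List String) (hc : deps.get? c = some es) :
    pvT deps c = es.foldl (fun m e => max m (pvT deps e)) 0 + 1 := by
  have hck : c ∈ deps.keys := by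
    by_contra hmem
    rw [(PySem.Dict.get?_eq_none_iff_not_mem_keys deps c).mpr hmem] at hc
    cases hc
  have hkl : deps.keys.length = deps.size := by
    simp [PySem.Dict.keys, PySem.Dict.size]
  have hpos : 1 ≤ deps.size := by
    have := List.length_pos_of_mem hck
    omega
  obtain ⟨g, hg⟩ : ∃ g, deps.size = g + 1 := ⟨deps.size - 1, by omega⟩
  have hstep : ∀ e ∈ es, pvStepTo deps c e := by
    intro e he
    unfold pvStepTo
    rw [PySem.Dict.getD_of_get?_eq_some deps [] hc]
    exact he
  show pvD deps deps.size c = _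
  rw [hg]
  simp only [pvD, hc]
  congr 1
  apply pv_foldl_max_congr
  intro e he
  have := pvD_stable_aux deps hnd g [c] e (pv_safe_child deps hsafe (hstep e he)) (by simp)
    (by simpa) (fun p hp => by simp at hp; subst hp; exact ⟨[], hstep e he⟩) (by simp; omega)
  rw [this]
  show pvD deps (g + 1) e = pvT deps e
  rw [← hg]
  rfl

theorem pvT_nonneg (deps : PySem.Dict String (List String)) (c : String) : 0 ≤ pvT deps c :=
  pvD_nonneg deps deps.size c

theorem pvT_nonkey (deps : PySem.Dict String (List String)) (c : String)
    (h : deps.get? c = none) : pvT deps c = 0 :=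
  pvD_nonkey deps deps.size c h

theorem pvT_key_ge_one (deps : PySem.Dict String (List String)) (hnd : deps.keys.Nodup)
    {c : String} (hsafe : pvSafe deps c) (es : List String) (hc : deps.get? c = some es) :
    1 ≤ pvT deps c := by
  rw [pvT_unfold deps hnd hsafe es hc]
  have := pv_foldl_max_le_init es (pvT deps) 0
  omega

theorem pvT_le_size (deps : PySem.Dict String (List String)) (c : String) :
    pvT deps c ≤ (deps.size : Int) :=
  pvD_le_fuel deps deps.size c

theorem pvT_child_le (deps : PySem.Dict String (List String)) (hnd : deps.keys.Nodup)
    {c : String} (hsafe : pvSafe deps c) (es : List String) (hc : deps.get? c = some es)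
    (e : String) (he : e ∈ es) : pvT deps e ≤ pvT deps c - 1 := by
  rw [pvT_unfold deps hnd hsafe es hc]
  have := pv_foldl_max_mem es (pvT deps) 0 he
  omega

-- ===== A-side correctness =====
def pvGood (deps : PySem.Dict String (List String)) (memo : PySem.Dict String Int) : Prop :=
  ∀ k v, memo.get? k = some v → pvSafe deps k ∧ v = pvT deps k

theorem pvFoldA (deps : PySem.Dict String (List String)) (f' : Nat) (es : List String)
    (hrec : ∀ e ∈ es, ∀ memo, pvGood deps memo →
      (pvMaxDepthA deps f' e memo).1 = pvT deps e ∧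
      pvGood deps (pvMaxDepthA deps f' e memo).2) :
    ∀ (acc : Int) (memo : PySem.Dict String Int), pvGood deps memo →
      (es.foldl (fun (st : Int × PySem.Dict String Int) elem =>
          (max st.1 (pvMaxDepthA deps f' elem st.2).1,
           (pvMaxDepthA deps f' elem st.2).2)) (acc, memo)).1 =
        es.foldl (fun m e => max m (pvT deps e)) acc ∧
      pvGood deps ((es.foldl (fun (st : Int × PySem.Dict String Int) elem =>
          (max st.1 (pvMaxDepthA deps f' elem st.2).1,
           (pvMaxDepthA deps f' elem st.2).2)) (acc, memo)).2) := by
  induction es with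
  | nil => intro acc memo hg; exact ⟨rfl, hg⟩
  | cons e es ihe =>
    intro acc memo hg
    simp only [List.foldl_cons]
    obtain ⟨h1, h2⟩ := hrec e (by simp) memo hg
    have hrest := ihe (fun e2 he2 m hm => hrec e2 (by simp [he2]) m hm)
      (max acc (pvMaxDepthA deps f' e memo).1) (pvMaxDepthA deps f' e memo).2 h2
    rw [← h1]
    exact hrest

theorem pvMaxDepthA_correct (deps : PySem.Dict String (List String)) (hnd : deps.keys.Nodup) :
    ∀ (f : Nat) (P : List String) (c : String) (memo : PySem.Dict String Int),
      pvSafe deps c → P.Nodup → (∀ p ∈ P, p ∈ deps.keys) → (∀ p ∈ P, ∃ l, pvIsPath deps p l c) →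
      deps.size ≤ f + P.length → pvGood deps memo →
      (pvMaxDepthA deps f c memo).1 = pvT deps c ∧ pvGood deps (pvMaxDepthA deps f c memo).2 := by
  intro f
  induction f using Nat.strong_induction_on with
  | _ f ih =>
    intro P c memo hsafe hPnd hPk hPp hsize hgood
    rw [pvMaxDepthA.eq_def]
    dsimp only
    by_cases hck : deps.contains c = true
    · have hcf : ¬ deps.contains c = false := by simp [hck]
      rw [if_neg hcf]
      have hcmem : c ∈ deps.keys := (PySem.Dict.contains_iff_mem_keys deps c).mp hck
      obtain ⟨es, hgc⟩ := pv_mem_keys_get? deps hcmem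
      cases hm : memo.get? c with
      | some v => exact ⟨(hgood c v hm).2, hgood⟩
      | none =>
        have hcP : c ∉ P := fun hmem => by
          obtain ⟨l, hl⟩ := hPp c hmem
          exact pv_safe_no_cycle deps hsafe l hl
        have hlen := pv_nodup_size deps P c hPnd hPk hcmem hcP
        obtain ⟨f', rfl⟩ : ∃ f', f = f' + 1 := ⟨f - 1, by omega⟩
        have hgd : deps.getD c [] = es := PySem.Dict.getD_of_get?_eq_some deps [] hgc
        have hstep : ∀ e ∈ es, pvStepTo deps c e := fun e he => by
          unfold pvStepTo; rw [hgd]; exact he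
        have hrec : ∀ e ∈ deps.getD c [], ∀ m, pvGood deps m →
            (pvMaxDepthA deps f' e m).1 = pvT deps e ∧
            pvGood deps (pvMaxDepthA deps f' e m).2 := by
          rw [hgd]
          intro e he m hm
          refine ih f' (by omega) (P ++ [c]) e m
            (pv_safe_child deps hsafe (hstep e he)) ?_ ?_ ?_ (by simp; omega) hm
          · rw [List.nodup_append_comm]; exact List.nodup_cons.mpr ⟨hcP, hPnd⟩
          · intro p hp; rcases List.mem_append.mp hp with hp | hp
            · exact hPk p hp
            · simp at hp; subst hp; exact hcmem
          · intro p hp; rcases List.mem_append.mp hp with hp | hp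
            · obtain ⟨l, hl⟩ := hPp p hp
              exact ⟨l ++ [c], pv_path_snoc deps p l c e hl (hstep e he)⟩
            · simp at hp; subst hp; exact ⟨[], hstep e he⟩
        obtain ⟨hf1, hf2⟩ := pvFoldA deps f' (deps.getD c []) hrec 0 memo hgood
        rw [hgd] at hf1 hf2
        dsimp only
        rw [hgd]
        constructor
        · rw [hf1, pvT_unfold deps hnd hsafe es hgc]
        · intro k v hv
          rw [PySem.Dict.get?_insert] at hv
          split at hv
          · rename_i hkc
            subst hkc
            have hv2 := Option.some.inj hv
            exact ⟨hsafe, by rw [← hv2, hf1, pvT_unfold deps hnd hsafe es hgc]⟩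
          · exact hf2 k v hv
    · have hcf : deps.contains c = false := by
        cases h : deps.contains c
        · rfl
        · exact absurd h hck
      rw [if_pos hcf]
      have hgc : deps.get? c = none := by
        rw [PySem.Dict.get?_eq_none_iff_not_mem_keys]
        exact fun hm => hck ((PySem.Dict.contains_iff_mem_keys deps c).mpr hm)
      exact ⟨(pvT_nonkey deps c hgc).symm, hgood⟩

theorem find_min_bowls_eq (compound_defs compounds_to_prepare : List String)
    (hnd : (pvParse compound_defs).keys.Nodup)
    (hsafe : ∀ t ∈ compounds_to_prepare, pvSafe (pvParse compound_defs) t) :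
    find_min_bowls compound_defs compounds_to_prepare =
      compounds_to_prepare.foldl (fun b c => max b (pvT (pvParse compound_defs) c)) 0 := by
  unfold find_min_bowls
  dsimp only
  obtain ⟨h1, _⟩ := pvFoldA (pvParse compound_defs) (pvParse compound_defs).size
    compounds_to_prepare
    (fun t ht m hm => pvMaxDepthA_correct (pvParse compound_defs) hnd
      (pvParse compound_defs).size [] t m (hsafe t ht) List.nodup_nil (by simp) (by simp)
      (by simp) hm)
    0 PySem.Dict.empty (fun k v h => by simp [PySem.Dict.get?_empty] at h)
  exact h1

-- ===== B-side correctness =====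
def pvSound (deps : PySem.Dict String (List String)) (d : PySem.Dict String Int) : Prop :=
  ∀ k, pvSafe deps k → d.getD k 0 ≤ pvT deps k

def pvCN (deps : PySem.Dict String (List String)) (d : PySem.Dict String Int) : Prop :=
  ∀ k, deps.get? k = none → d.getD k 0 = 0

def pvHr (deps : PySem.Dict String (List String)) (r : Nat) (d : PySem.Dict String Int) : Prop :=
  ∀ k ∈ deps.keys, pvSafe deps k → pvT deps k ≤ (r : Int) + 1 → d.getD k 0 = pvT deps k

theorem pvRoundAux (deps : PySem.Dict String (List String)) (hnd : deps.keys.Nodup) (r : Nat) :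
    ∀ (ks : List String) (d : PySem.Dict String Int), ks.Nodup → (∀ k ∈ ks, k ∈ deps.keys) →
      pvSound deps d → pvCN deps d →
      (∀ k ∈ ks, pvSafe deps k → pvT deps k ≤ (r : Int) + 1 → d.getD k 0 = pvT deps k) →
      (∀ k ∈ deps.keys, k ∉ ks → pvSafe deps k → pvT deps k ≤ (r : Int) + 2 →
        d.getD k 0 = pvT deps k) →
      pvSound deps (ks.foldl (pvRelax deps) d) ∧ pvCN deps (ks.foldl (pvRelax deps) d) ∧
      (∀ k ∈ deps.keys, pvSafe deps k → pvT deps k ≤ (r : Int) + 2 →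
        (ks.foldl (pvRelax deps) d).getD k 0 = pvT deps k) := by
  intro ks
  induction ks with
  | nil => intro d _ _ hs hcn _ h6; exact ⟨hs, hcn, fun k hk hsf ht => h6 k hk (by simp) hsf ht⟩
  | cons k₀ tl ihk =>
    intro d hndks hks hs hcn h5 h6
    simp only [List.foldl_cons]
    have hk₀ : k₀ ∈ deps.keys := hks k₀ (by simp)
    obtain ⟨es₀, hgc⟩ := pv_mem_keys_get? deps hk₀
    have hgd : deps.getD k₀ [] = es₀ := PySem.Dict.getD_of_get?_eq_some deps [] hgc
    have hstep : ∀ e ∈ es₀, pvStepTo deps k₀ e := fun e he => by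
      unfold pvStepTo; rw [hgd]; exact he
    have hnotl : k₀ ∉ tl := (List.nodup_cons.mp hndks).1
    have hD2 : ∀ j, j ≠ k₀ → (pvRelax deps d k₀).getD j 0 = d.getD j 0 := fun j hj => by
      unfold pvRelax; exact PySem.Dict.getD_insert_of_ne d _ 0 hj
    have hs2 : pvSound deps (pvRelax deps d k₀) := by
      intro k hsf
      by_cases hk : k = k₀
      · subst hk
        have hfold_le : (deps.getD k []).foldl (fun m e => max m (d.getD e 0)) 0 ≤
            es₀.foldl (fun m e => max m (pvT deps e)) 0 := by
          rw [hgd]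
          exact pv_foldl_max_mono es₀ _ _ 0 0 le_rfl
            (fun e he => hs e (pv_safe_child deps hsf (hstep e he)))
        unfold pvRelax
        rw [PySem.Dict.getD_insert_self, pvT_unfold deps hnd hsf es₀ hgc]
        omega
      · rw [hD2 k hk]; exact hs k hsf
    have hcn2 : pvCN deps (pvRelax deps d k₀) := by
      intro k hk
      have hne : k ≠ k₀ := fun h => by subst h; rw [hgc] at hk; cases hk
      rw [hD2 k hne]; exact hcn k hk
    have h52 : ∀ k ∈ tl, pvSafe deps k → pvT deps k ≤ (r : Int) + 1 →
        (pvRelax deps d k₀).getD k 0 = pvT deps k := by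
      intro k hk hsf ht
      have hne : k ≠ k₀ := fun h => by subst h; exact hnotl hk
      rw [hD2 k hne]; exact h5 k (by simp [hk]) hsf ht
    have h62 : ∀ k ∈ deps.keys, k ∉ tl → pvSafe deps k → pvT deps k ≤ (r : Int) + 2 →
        (pvRelax deps d k₀).getD k 0 = pvT deps k := by
      intro k hk hkt hsf ht
      by_cases hkk : k = k₀
      · subst hkk
        unfold pvRelax
        rw [PySem.Dict.getD_insert_self, pvT_unfold deps hnd hsf es₀ hgc, hgd]
        congr 1
        apply pv_foldl_max_congr
        intro e he
        have hesafe : pvSafe deps e := pv_safe_child deps hsf (hstep e he)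
        have hchild : pvT deps e ≤ pvT deps k - 1 := pvT_child_le deps hnd hsf es₀ hgc e he
        by_cases hek : deps.get? e = none
        · rw [hcn e hek, pvT_nonkey deps e hek]
        · have hemem : e ∈ deps.keys := by
            by_contra hm
            exact hek ((PySem.Dict.get?_eq_none_iff_not_mem_keys deps e).mpr hm)
          by_cases hin : e ∈ k :: tl
          · exact h5 e hin hesafe (by omega)
          · exact h6 e hemem hin hesafe (by omega)
      · have hnotin : k ∉ k₀ :: tl := by simp [hkk, hkt]
        rw [hD2 k hkk]; exact h6 k hk hnotin hsf ht
    exact ihk (pvRelax deps d k₀) (List.nodup_cons.mp hndks).2 (fun k hk => hks k (by simp [hk]))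
      hs2 hcn2 h52 h62

theorem pvRound_correct (deps : PySem.Dict String (List String)) (hnd : deps.keys.Nodup)
    (r : Nat) (d : PySem.Dict String Int) (hs : pvSound deps d) (hcn : pvCN deps d)
    (hr : pvHr deps r d) :
    pvSound deps (pvRound deps d) ∧ pvCN deps (pvRound deps d) ∧
      pvHr deps (r + 1) (pvRound deps d) := by
  obtain ⟨h1, h2, h3⟩ := pvRoundAux deps hnd r deps.keys d hnd (fun k hk => hk) hs hcn
    (fun k hk hsf ht => hr k hk hsf ht) (fun k hk hk' _ _ => absurd hk hk')
  refine ⟨h1, h2, ?_⟩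
  intro k hk hsf ht
  exact h3 k hk hsf (by push_cast at ht ⊢; omega)

theorem pvRounds_correct (deps : PySem.Dict String (List String)) (hnd : deps.keys.Nodup) :
    ∀ (n : Nat) (r : Nat) (d : PySem.Dict String Int), pvSound deps d → pvCN deps d →
      pvHr deps r d →
      pvSound deps ((List.range n).foldl (fun d _ => pvRound deps d) d) ∧
      pvCN deps ((List.range n).foldl (fun d _ => pvRound deps d) d) ∧
      pvHr deps (r + n) ((List.range n).foldl (fun d _ => pvRound deps d) d) := by
  intro n
  induction n with
  | zero => intro r d hs hcn hr; simpa using ⟨hs, hcn, hr⟩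
  | succ n ih =>
    intro r d hs hcn hr
    obtain ⟨h1, h2, h3⟩ := ih r d hs hcn hr
    rw [List.range_succ, List.foldl_append]
    obtain ⟨g1, g2, g3⟩ := pvRound_correct deps hnd (r + n) _ h1 h2 h3
    exact ⟨g1, g2, by rw [show r + (n + 1) = r + n + 1 by omega]; exact g3⟩

theorem pvInit_getD (l : List String) (d : PySem.Dict String Int) (j : String) :
    (l.foldl (fun d k => d.insert k (1 : Int)) d).getD j 0 =
      if j ∈ l then 1 else d.getD j 0 := by
  induction l generalizing d with
  | nil => simp
  | cons x l ih =>
    simp only [List.foldl_cons, ih]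
    by_cases hjl : j ∈ l
    · simp [hjl]
    · by_cases hjx : j = x
      · subst hjx
        simp [hjl, PySem.Dict.getD_insert_self]
      · simp [hjl, hjx, PySem.Dict.getD_insert_of_ne d 1 0 hjx]

theorem find_min_bowls_alt_eq (compound_defs compounds_to_prepare : List String)
    (hnd : (pvParse compound_defs).keys.Nodup)
    (hsafe : ∀ t ∈ compounds_to_prepare, pvSafe (pvParse compound_defs) t) :
    find_min_bowls_alt compound_defs compounds_to_prepare =
      compounds_to_prepare.foldl (fun b c => max b (pvT (pvParse compound_defs) c)) 0 := by
  unfold find_min_bowls_alt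
  dsimp only
  apply pv_foldl_max_congr
  intro c hc
  have hinit_s : pvSound (pvParse compound_defs)
      ((pvParse compound_defs).keys.foldl (fun d k => d.insert k (1 : Int)) PySem.Dict.empty) := by
    intro k hsf
    rw [pvInit_getD]
    split_ifs with hk
    · obtain ⟨es, hgc⟩ := pv_mem_keys_get? (pvParse compound_defs) hk
      exact pvT_key_ge_one (pvParse compound_defs) hnd hsf es hgc
    · rw [PySem.Dict.getD_empty]; exact pvT_nonneg (pvParse compound_defs) k
  have hinit_cn : pvCN (pvParse compound_defs)
      ((pvParse compound_defs).keys.foldl (fun d k => d.insert k (1 : Int)) PySem.Dict.empty) := by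
    intro k hk
    rw [pvInit_getD]
    have hnm : k ∉ (pvParse compound_defs).keys :=
      (PySem.Dict.get?_eq_none_iff_not_mem_keys (pvParse compound_defs) k).mp hk
    simp [hnm, PySem.Dict.getD_empty]
  have hinit_hr : pvHr (pvParse compound_defs) 0
      ((pvParse compound_defs).keys.foldl (fun d k => d.insert k (1 : Int)) PySem.Dict.empty) := by
    intro k hk hsf ht
    rw [pvInit_getD]
    obtain ⟨es, hgc⟩ := pv_mem_keys_get? (pvParse compound_defs) hk
    have h1 := pvT_key_ge_one (pvParse compound_defs) hnd hsf es hgc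
    simp only [hk, if_pos]
    push_cast at ht
    omega
  obtain ⟨_, hcn, hr⟩ := pvRounds_correct (pvParse compound_defs) hnd
    (pvParse compound_defs).size 0 _ hinit_s hinit_cn hinit_hr
  by_cases hgc : (pvParse compound_defs).get? c = none
  · rw [hcn c hgc, pvT_nonkey (pvParse compound_defs) c hgc]
  · have hcmem : c ∈ (pvParse compound_defs).keys := by
      by_contra hm
      exact hgc ((PySem.Dict.get?_eq_none_iff_not_mem_keys (pvParse compound_defs) c).mpr hm)
    refine hr c hcmem (hsafe c hc) ?_
    have hle := pvT_le_size (pvParse compound_defs) c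
    push_cast
    omega

theorem pvParse_keys_nodup (compound_defs : List String) : (pvParse compound_defs).keys.Nodup := by
  unfold pvParse
  exact PySem.Dict.nodup_keys_foldl_insert_key compound_defs
    (fun definition => ((PySem.Str.split? definition "=").getD []).getD 0 "")
    (fun d definition =>
      (PySem.Str.split? ((((PySem.Str.split? definition "=").getD [])).getD 1 "") "+").getD [])
    PySem.Dict.empty PySem.Dict.nodup_keys_empty

-- ===== VERDICT (by name: the statement is the Claim_ definition above) =====
theorem find_min_bowls_spec : Claim_equal_find_min_bowls := by
  intro compound_defs compounds_to_prepare _ hpre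
  have hnd := pvParse_keys_nodup compound_defs
  have hsafe : ∀ t ∈ compounds_to_prepare, pvSafe (pvParse compound_defs) t := fun t ht =>
    pv_safe_of_pre (pvParse compound_defs) hnd t (hpre.2 t ht).1 (hpre.2 t ht).2
  unfold Spec_find_min_bowls
  rw [find_min_bowls_eq compound_defs compounds_to_prepare hnd hsafe,
    find_min_bowls_alt_eq compound_defs compounds_to_prepare hnd hsafe]
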